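-- pv_equiv track=rewrite | github.com/joagonzalez/ditella-tecnicas-algoritmicas | ejercicios/divide_conquer/ej2.py | maux
-- ===== SOURCE A (Python) =====
-- def maux(L, desde, hasta):
--     if desde == hasta - 1:  # caso base
--         res = L[desde]
--     else:                   # caso recursivo
--         # dividir
--         medio = (desde + hasta) // 2
--         # conquistar
--         m1 = maux(L, desde, medio)
--         m2 = maux(L, medio, hasta)
--         # combinar
--         if m1 > m2:
--             res = m1
--         else:
--             res = m2
--     return res
-- ===== SOURCE B (Python) =====
-- def maux(L, desde, hasta):
--     res = L[desde]
--     for i in range(desde + 1, hasta):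
--         if L[i] > res:
--             res = L[i]
--     return res
-- ===== Notes on version B (the rewrite author's own statement) =====
-- stated objective: simpler
-- what changed: Replaces the divide-and-conquer recursion over the slice with a single flat left-to-right scan keeping the running maximum.
import Mathlib
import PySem

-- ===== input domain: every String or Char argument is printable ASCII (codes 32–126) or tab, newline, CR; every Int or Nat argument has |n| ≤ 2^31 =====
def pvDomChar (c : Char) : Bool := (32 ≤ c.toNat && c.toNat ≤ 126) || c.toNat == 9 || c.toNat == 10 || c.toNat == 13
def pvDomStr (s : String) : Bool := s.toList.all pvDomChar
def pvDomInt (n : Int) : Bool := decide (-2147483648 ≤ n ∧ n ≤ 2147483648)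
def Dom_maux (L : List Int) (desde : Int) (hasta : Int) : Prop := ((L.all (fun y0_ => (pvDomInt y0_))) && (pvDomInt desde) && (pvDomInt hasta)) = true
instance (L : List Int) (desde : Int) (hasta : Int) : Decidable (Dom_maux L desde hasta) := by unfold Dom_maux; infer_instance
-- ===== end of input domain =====

-- B replaces A's divide-and-conquer recursion by a single linear scan keeping the running maximum (return value only; neither mutates).

-- ===== PORT A =====
-- Python recursion totalized with fuel (= slice length, sufficient under Pre_);
-- L[i] is exact via pyGetD under Pre_ (Python raises outside, excluded by Pre_).
def mauxFuel (fuel : Nat) (L : List Int) (desde : Int) (hasta : Int) : Int :=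
  match fuel with
  | 0 => 0
  | f + 1 =>
    if desde = hasta - 1 then
      PySem.List.pyGetD L desde 0
    else
      let medio := PySem.Int.floordiv (desde + hasta) 2
      let m1 := mauxFuel f L desde medio
      let m2 := mauxFuel f L medio hasta
      if m1 > m2 then m1 else m2

def maux (L : List Int) (desde : Int) (hasta : Int) : Int :=
  mauxFuel (hasta - desde).toNat L desde hasta

-- ===== PORT B =====
def maux_alt (L : List Int) (desde : Int) (hasta : Int) : Int :=
  (PySem.List.pyRange (desde + 1) hasta 1).foldl
    (fun res i => if PySem.List.pyGetD L i 0 > res then PySem.List.pyGetD L i 0 else res)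
    (PySem.List.pyGetD L desde 0)

-- ===== PRECONDITION & SPEC =====
-- Pre_: exactly the inputs on which the Python A returns: a non-empty range whose
-- every index desde..hasta-1 resolves under Python (possibly negative) indexing;
-- with hasta ≤ desde A recurses forever (RecursionError), out of range it raises IndexError.
def Pre_maux (L : List Int) (desde : Int) (hasta : Int) : Prop :=
  desde < hasta ∧ -(L.length : Int) ≤ desde ∧ hasta ≤ (L.length : Int)
instance (L : List Int) (desde : Int) (hasta : Int) : Decidable (Pre_maux L desde hasta) := by unfold Pre_maux; infer_instance

def pvWitness_maux : List Int × Int × Int := ([3, 1, 4, 1, 5], 1, 4)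

def Spec_maux (L : List Int) (desde : Int) (hasta : Int) (out : Int) : Prop := out = maux_alt L desde hasta
instance (L : List Int) (desde : Int) (hasta : Int) (out : Int) : Decidable (Spec_maux L desde hasta out) := by unfold Spec_maux; infer_instance

-- ===== CLAIM (what is proved, stated in full; the proofs are below) =====
def Claim_equal_maux : Prop := ∀ (L : List Int) (desde : Int) (hasta : Int), Dom_maux L desde hasta → Pre_maux L desde hasta → Spec_maux L desde hasta (maux L desde hasta)

-- ===== LEMMAS AND PROOFS =====

-- B's scan step is max.
theorem step_eq_max (L : List Int) :
    (fun res i => if PySem.List.pyGetD L i 0 > res then PySem.List.pyGetD L i 0 else res)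
      = fun (res i : Int) => max res (PySem.List.pyGetD L i 0) := by
  funext res i
  by_cases h : PySem.List.pyGetD L i 0 ≤ res
  · simp [not_lt.mpr h, max_eq_left h]
  · have h' := lt_of_not_ge h
    simp [h', max_eq_right h'.le]

theorem foldl_max_pull {g : Int → Int} (l : List Int) (a b : Int) :
    max a (l.foldl (fun r i => max r (g i)) b)
      = l.foldl (fun r i => max r (g i)) (max a b) := by
  induction l generalizing b with
  | nil => rfl
  | cons x xs ih => simp only [List.foldl_cons]; rw [ih, max_assoc]

theorem maux_alt_as_max (L : List Int) (d h : Int) :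
    maux_alt L d h
      = (PySem.List.pyRange (d + 1) h 1).foldl
          (fun r i => max r (PySem.List.pyGetD L i 0)) (PySem.List.pyGetD L d 0) := by
  unfold maux_alt; rw [step_eq_max]

theorem maux_alt_split (L : List Int) (d m h : Int) (hdm : d < m) (hmh : m < h) :
    maux_alt L d h
      = (if maux_alt L d m > maux_alt L m h then maux_alt L d m else maux_alt L m h) := by
  have hsplit : PySem.List.pyRange (d + 1) h 1
      = PySem.List.pyRange (d + 1) m 1 ++ PySem.List.pyRange m h 1 :=
    PySem.List.pyRange_one_append (d + 1) m h (by omega) (by omega)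
  have hcons : PySem.List.pyRange m h 1 = m :: PySem.List.pyRange (m + 1) h 1 :=
    PySem.List.pyRange_one_cons hmh
  rw [maux_alt_as_max, maux_alt_as_max, maux_alt_as_max, hsplit, List.foldl_append, hcons,
    List.foldl_cons]
  set A := (PySem.List.pyRange (d + 1) m 1).foldl
    (fun r i => max r (PySem.List.pyGetD L i 0)) (PySem.List.pyGetD L d 0) with hA
  rw [← foldl_max_pull]
  by_cases hle : A ≤ (PySem.List.pyRange (m + 1) h 1).foldl
      (fun r i => max r (PySem.List.pyGetD L i 0)) (PySem.List.pyGetD L m 0)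
  · rw [if_neg (not_lt.mpr hle), max_eq_right hle]
  · have hlt := lt_of_not_ge hle
    rw [if_pos hlt, max_eq_left hlt.le]

theorem mauxFuel_eq (f : Nat) (L : List Int) (d h : Int)
    (hdh : d < h) (hf : (h - d).toNat ≤ f) :
    mauxFuel f L d h = maux_alt L d h := by
  induction f generalizing d h with
  | zero => omega
  | succ f ih =>
    by_cases hbase : d = h - 1
    · subst hbase
      rw [show mauxFuel (f + 1) L (h - 1) h = PySem.List.pyGetD L (h - 1) 0 from by
        simp [mauxFuel]]
      unfold maux_alt
      rw [PySem.List.pyRange_one_eq_nil (by omega), List.foldl_nil]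
    · have h2 : d + 2 ≤ h := by omega
      have hmid := PySem.Int.floordiv_two_mid_bounds (le_of_lt hdh)
      have hml : d < PySem.Int.floordiv (d + h) 2 := by
        have := PySem.Int.le_floordiv_iff_mul_le (a := d + h) (b := 2) (q := d + 1) (by omega)
        omega
      have hmr : PySem.Int.floordiv (d + h) 2 < h := by
        have := PySem.Int.floordiv_lt_iff_lt_mul (a := d + h) (b := 2) (q := h) (by omega)
        omega
      simp only [mauxFuel, if_neg hbase]
      rw [ih d _ hml (by omega), ih _ h hmr (by omega),
        maux_alt_split L d (PySem.Int.floordiv (d + h) 2) h hml hmr]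

-- ===== VERDICT (by name: the statement is the Claim_ definition above) =====
theorem maux_spec : Claim_equal_maux := by
  intro L d h _ hpre
  unfold Spec_maux maux
  exact mauxFuel_eq _ L d h hpre.1 (le_refl _)
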